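-- pv_equiv track=rewrite | github.com/SakethVangala11/Coding | 1933-number-of-different-integers-in-a-string/number-of-different-integers-in-a-string.py | numDifferentIntegers
-- ===== SOURCE A (Python) =====
-- def numDifferentIntegers(word: str) -> int:
--     s = ""
--     for i in word:
--         if ord(i)>96 and ord(i)<123:
--             s+=" "
--         else:
--             s+=i
--     l = s.split(" ")
--     se = set()
--     for i in l:
--         if i:
--             se.add(int(i))
--     return len(se)
-- ===== SOURCE B (Python) =====
-- def numDifferentIntegers(word: str) -> int:
--     seen = set()
--     buf = []
--     for ch in word:
--         if ch.isdigit():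
--             buf.append(ch)
--         else:
--             if buf:
--                 seen.add(int(''.join(buf)))
--                 buf = []
--     if buf:
--         seen.add(int(''.join(buf)))
--     return len(seen)
-- ===== Notes on version B (the rewrite author's own statement) =====
-- stated objective: faster
-- what changed: B tokenizes in a single forward pass with a running digit buffer flushed into a set of ints, instead of A's three phases (build a character-by-character cleaned copy of the string, split it on spaces, then int-parse each piece).
-- outside the precondition, e.g. on numDifferentIntegers('-5 5'): A returns 2, B returns 1
import Mathlib
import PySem

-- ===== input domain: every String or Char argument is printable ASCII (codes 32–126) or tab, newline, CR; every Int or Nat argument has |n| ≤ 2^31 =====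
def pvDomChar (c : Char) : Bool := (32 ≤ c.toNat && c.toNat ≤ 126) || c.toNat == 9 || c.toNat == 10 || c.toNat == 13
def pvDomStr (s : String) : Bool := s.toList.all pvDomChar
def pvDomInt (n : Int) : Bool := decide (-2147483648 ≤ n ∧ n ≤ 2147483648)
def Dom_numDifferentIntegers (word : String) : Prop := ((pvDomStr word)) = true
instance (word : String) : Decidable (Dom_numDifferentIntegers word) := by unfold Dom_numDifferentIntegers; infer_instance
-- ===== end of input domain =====

-- B replaces A's three phases (copy the string with lowercase letters blanked, split on " ",
-- parse each piece) by one forward pass flushing a running digit buffer into the set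
-- (measured faster by a constant factor in a timing run).

-- ===== PORT A =====
-- 'if i: se.add(int(i))' for a nonempty split piece; int(i) raises ValueError when the piece
-- is not int-parsable (ofChars? = none) — those inputs are outside Pre_ below.
def pvAddTok (se : PySem.Set Int) (t : List Char) : PySem.Set Int :=
  if t ≠ [] then
    match PySem.Int.ofChars? t with
    | some v => PySem.Set.add se v
    | none => se
  else se

def numDifferentIntegers (word : String) : Int :=
  let s : List Char :=
    word.toList.foldl (fun s i => if 96 < i.toNat ∧ i.toNat < 123 then s ++ [' '] else s ++ [i]) []
  let l := PySem.Chars.splitOn s [' ']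
  let se := l.foldl pvAddTok ([] : PySem.Set Int)
  PySem.Set.len se

-- ===== PORT B =====
-- flush the pending digit buffer: seen.add(int(''.join(buf))) when buf is nonempty
-- (ofChars? of a nonempty digit run is always some, so the none arm is unreachable)
def pvFlush (st : PySem.Set Int × List Char) : PySem.Set Int :=
  if st.2 ≠ [] then
    match PySem.Int.ofChars? st.2 with
    | some v => PySem.Set.add st.1 v
    | none => st.1
  else st.1

def numDifferentIntegers_alt (word : String) : Int :=
  let st := word.toList.foldl
    (fun (st : PySem.Set Int × List Char) ch =>
      if PySem.Chars.isdigit ch then (st.1, st.2 ++ [ch])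
      else if st.2 ≠ [] then (pvFlush st, []) else st)
    (([] : PySem.Set Int), ([] : List Char))
  PySem.Set.len (pvFlush st)

-- ===== PRECONDITION & SPEC =====
-- Pre_ narrows to the problem's natural alphabet (lowercase letters, digits, spaces).  A also
-- returns on a few strings outside it — e.g. pieces with a sign or tab/newline padding that
-- int() still parses, such as "-5 5" — where B's digit-run tokenizer is not meant to match;
-- on most other excluded strings ("A1", "a.b") A raises ValueError.
def Pre_numDifferentIntegers (word : String) : Prop :=
  (word.toList.all fun c => (97 ≤ c.toNat && c.toNat ≤ 122) || (48 ≤ c.toNat && c.toNat ≤ 57) || c == ' ') = true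
instance (word : String) : Decidable (Pre_numDifferentIntegers word) := by
  unfold Pre_numDifferentIntegers; infer_instance
def pvWitness_numDifferentIntegers : String := "a123bc34d8ef34 007 7"

def Spec_numDifferentIntegers (word : String) (out : Int) : Prop := out = numDifferentIntegers_alt word
instance (word : String) (out : Int) : Decidable (Spec_numDifferentIntegers word out) := by unfold Spec_numDifferentIntegers; infer_instance

-- ===== CLAIM (what is proved, stated in full; the proofs are below) =====
def Claim_equal_numDifferentIntegers : Prop := ∀ (word : String), Dom_numDifferentIntegers word → Pre_numDifferentIntegers word → Spec_numDifferentIntegers word (numDifferentIntegers word)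

-- ===== LEMMAS AND PROOFS =====

-- the per-character map A's first loop performs
def pvMapA (c : Char) : Char := if 96 < c.toNat ∧ c.toNat < 123 then ' ' else c
-- the same map expressed by digit-ness (equal to pvMapA on Pre_'s alphabet)
def pvMapG (c : Char) : Char := if PySem.Chars.isdigit c then c else ' '

-- reference splitter on ' ' (structural recursion, no fuel)
def pvSplitSp (cur : List Char) : List Char → List (List Char)
  | [] => [cur]
  | c :: rest => if c = ' ' then cur :: pvSplitSp [] rest else pvSplitSp (cur ++ [c]) rest

lemma pvBuild (cs : List Char) (s0 : List Char) :
    cs.foldl (fun s i => if 96 < i.toNat ∧ i.toNat < 123 then s ++ [' '] else s ++ [i]) s0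
      = s0 ++ cs.map pvMapA := by
  induction cs generalizing s0 with
  | nil => simp
  | cons c cs ih => simp [pvMapA, ih]; split <;> simp

lemma pvSplitOn_space (fuel : Nat) (l cur : List Char) (acc : List (List Char))
    (h : l.length < fuel) :
    PySem.Chars.splitOn.go [' '] fuel l cur acc = acc.reverse ++ pvSplitSp cur.reverse l := by
  induction fuel generalizing l cur acc with
  | zero => omega
  | succ fuel ih =>
    cases l with
    | nil => simp [PySem.Chars.splitOn.go, pvSplitSp]
    | cons c rest =>
      by_cases hc : c = ' '
      · subst hc
        have : ([' '].isPrefixOf (' ' :: rest)) = true := by simp [List.isPrefixOf]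
        simp only [PySem.Chars.splitOn.go, this]
        rw [ih]
        · simp [pvSplitSp]
        · simpa using Nat.lt_of_succ_lt_succ h
      · have : ([' '].isPrefixOf (c :: rest)) = false := by
          simp [List.isPrefixOf]; exact fun h' => absurd h'.symm hc
        simp only [PySem.Chars.splitOn.go, this]
        rw [if_neg (by simp [this])]
        rw [ih]
        · simp [pvSplitSp, hc]
        · simpa using Nat.lt_of_succ_lt_succ h
      
lemma pvMain (cs : List Char) (se : PySem.Set Int) (buf : List Char) :
    PySem.Set.len (pvFlush (cs.foldl
        (fun (st : PySem.Set Int × List Char) ch =>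
          if PySem.Chars.isdigit ch then (st.1, st.2 ++ [ch])
          else if st.2 ≠ [] then (pvFlush st, []) else st)
        (se, buf)))
      = PySem.Set.len ((pvSplitSp buf (cs.map pvMapG)).foldl pvAddTok se) := by
  induction cs generalizing se buf with
  | nil =>
    simp [pvSplitSp, pvFlush, pvAddTok]
  | cons c cs ih =>
    by_cases hd : PySem.Chars.isdigit c = true
    · have hne : c ≠ ' ' := by
        intro h; subst h; simp [PySem.Chars.isdigit] at hd
      simp only [List.map_cons, List.foldl_cons, pvMapG, hd, if_true]
      rw [pvSplitSp]
      simp only [hne, if_false]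
      exact ih se (buf ++ [c])
    · have hd' : PySem.Chars.isdigit c = false := by simpa using hd
      simp only [List.map_cons, List.foldl_cons, pvMapG, hd', if_false, Bool.false_eq_true]
      rw [pvSplitSp, if_pos rfl]
      by_cases hb : buf = []
      · subst hb
        simp only [ne_eq, not_true_eq_false, if_false, List.foldl_cons]
        have : pvAddTok se [] = se := by simp [pvAddTok]
        rw [this]
        exact ih se []
      · simp only [ne_eq, hb, not_false_eq_true, if_pos, List.foldl_cons]
        have : pvAddTok se buf = pvFlush (se, buf) := by
          simp [pvAddTok, pvFlush, hb]
        rw [this]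
        exact ih _ []

lemma pvIsdigit (c : Char) : PySem.Chars.isdigit c = true ↔ (48 ≤ c.toNat ∧ c.toNat ≤ 57) := by
  unfold PySem.Chars.isdigit
  rw [Bool.and_eq_true, decide_eq_true_iff, decide_eq_true_iff, Char.le_def, Char.le_def,
      UInt32.le_iff_toNat_le, UInt32.le_iff_toNat_le]
  exact Iff.rfl

lemma pvMapEq (cs : List Char)
    (h : (cs.all fun c => (97 ≤ c.toNat && c.toNat ≤ 122) || (48 ≤ c.toNat && c.toNat ≤ 57) || c == ' ') = true) :
    cs.map pvMapA = cs.map pvMapG := by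
  apply List.map_congr_left
  intro c hc
  have hm := (List.all_eq_true.mp h) c hc
  simp only [Bool.or_eq_true, Bool.and_eq_true, decide_eq_true_eq, beq_iff_eq] at hm
  unfold pvMapA pvMapG
  by_cases hd : PySem.Chars.isdigit c = true
  · have hrange := (pvIsdigit c).mp hd
    rw [if_pos hd, if_neg (by omega)]
  · have hnotd : ¬(48 ≤ c.toNat ∧ c.toNat ≤ 57) := fun hx => hd ((pvIsdigit c).mpr hx)
    rw [if_neg hd]
    rcases hm with (h1 | h2) | h3
    · rw [if_pos (by omega)]
    · exact absurd h2 hnotd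
    · subst h3; rw [if_neg (by simp [Char.toNat])]

-- ===== VERDICT (by name: the statement is the Claim_ definition above) =====
theorem numDifferentIntegers_spec : Claim_equal_numDifferentIntegers := by
  intro word _ hpre
  unfold Spec_numDifferentIntegers numDifferentIntegers numDifferentIntegers_alt
  rw [pvBuild]
  simp only [List.nil_append]
  unfold Pre_numDifferentIntegers at hpre
  rw [pvMapEq word.toList hpre]
  unfold PySem.Chars.splitOn
  rw [pvSplitOn_space _ _ _ _ (by simp)]
  simpa using (pvMain word.toList [] []).symm
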